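-- pv_equiv track=rewrite | github.com/valITino/blhackbox | mcp_servers/blhackbox_aggregator_mcp.py | _classify_raw_outputs
-- ===== SOURCE A (Python) =====
-- def _classify_raw_outputs(raw_outputs: dict[str, str]) -> dict[str, str]:
--     """Classify raw tool outputs into agent categories.
--
--     Returns a dict mapping category names to combined raw output strings.
--     """
--     categories: dict[str, list[str]] = {
--         "recon": [],
--         "network": [],
--         "vuln": [],
--         "web": [],
--         "all": [],  # everything goes to error_log agent
--     }
--
--     # Keyword-based classification
--     recon_tools = {
--         "subfinder", "amass", "whois", "fierce", "dnsenum", "dnsrecon",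
--         "theharvester", "shodan", "censys", "crtsh", "ct", "osint",
--         "hexstrike_recon", "recon",
--     }
--     network_tools = {
--         "nmap", "masscan", "rustscan", "ping", "traceroute",
--         "hexstrike_network", "network",
--     }
--     vuln_tools = {
--         "nuclei", "sqlmap", "wpscan_vuln", "hexstrike_vuln", "vuln",
--         "vulnerability", "cve",
--     }
--     web_tools = {
--         "nikto", "gobuster", "dirb", "whatweb", "wafw00f", "httpx",
--         "katana", "wpscan", "dirsearch", "ffuf",
--         "hexstrike_web", "web",
--     }
--
--     for tool_name, output in raw_outputs.items():
--         tool_lower = tool_name.lower()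
--         categories["all"].append(f"=== {tool_name} ===\n{output}")
--
--         classified = False
--         for keyword in recon_tools:
--             if keyword in tool_lower:
--                 categories["recon"].append(f"=== {tool_name} ===\n{output}")
--                 classified = True
--                 break
--
--         if not classified:
--             for keyword in network_tools:
--                 if keyword in tool_lower:
--                     categories["network"].append(f"=== {tool_name} ===\n{output}")
--                     classified = True
--                     break
--
--         if not classified:
--             for keyword in vuln_tools:
--                 if keyword in tool_lower:
--                     categories["vuln"].append(f"=== {tool_name} ===\n{output}")
--                     classified = True
--                     break
--
--         if not classified:
--             for keyword in web_tools:
--                 if keyword in tool_lower: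
--                     categories["web"].append(f"=== {tool_name} ===\n{output}")
--                     classified = True
--                     break
--
--         # If not classified, send to both recon and web as a best-effort
--         if not classified:
--             categories["recon"].append(f"=== {tool_name} ===\n{output}")
--             categories["web"].append(f"=== {tool_name} ===\n{output}")
--
--     return {
--         "recon": "\n\n".join(categories["recon"]),
--         "network": "\n\n".join(categories["network"]),
--         "vuln": "\n\n".join(categories["vuln"]),
--         "web": "\n\n".join(categories["web"]),
--         "all": "\n\n".join(categories["all"]),
--     }
-- ===== SOURCE B (Python) =====
-- _CATS = [
--     ("recon", {
--         "subfinder", "amass", "whois", "fierce", "dnsenum", "dnsrecon",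
--         "theharvester", "shodan", "censys", "crtsh", "ct", "osint",
--         "hexstrike_recon", "recon",
--     }),
--     ("network", {
--         "nmap", "masscan", "rustscan", "ping", "traceroute",
--         "hexstrike_network", "network",
--     }),
--     ("vuln", {
--         "nuclei", "sqlmap", "wpscan_vuln", "hexstrike_vuln", "vuln",
--         "vulnerability", "cve",
--     }),
--     ("web", {
--         "nikto", "gobuster", "dirb", "whatweb", "wafw00f", "httpx",
--         "katana", "wpscan", "dirsearch", "ffuf",
--         "hexstrike_web", "web",
--     }),
-- ]
--
--
-- def _targets(tool_name):
--     """Categories an entry belongs to: first matching category, or the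
--     recon+web best-effort fallback when nothing matches."""
--     tool_lower = tool_name.lower()
--     for cat, keywords in _CATS:
--         if any(kw in tool_lower for kw in keywords):
--             return (cat,)
--     return ("recon", "web")
--
--
-- def _classify_raw_outputs(raw_outputs: dict[str, str]) -> dict[str, str]:
--     tagged = [(_targets(name), f"=== {name} ===\n{output}")
--               for name, output in raw_outputs.items()]
--     result = {cat: "\n\n".join(e for tags, e in tagged if cat in tags)
--               for cat, _ in _CATS}
--     result["all"] = "\n\n".join(e for _, e in tagged)
--     return result
-- ===== Notes on version B (the rewrite author's own statement) =====
-- stated objective: simpler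
-- what changed: Replaces the single pass with five mutable buckets and four sequential break-on-match keyword loops by a tagging pass (each entry mapped to its target categories via a data table of (category, keywords) pairs) followed by a per-category filter-and-join comprehension.
import Mathlib
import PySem

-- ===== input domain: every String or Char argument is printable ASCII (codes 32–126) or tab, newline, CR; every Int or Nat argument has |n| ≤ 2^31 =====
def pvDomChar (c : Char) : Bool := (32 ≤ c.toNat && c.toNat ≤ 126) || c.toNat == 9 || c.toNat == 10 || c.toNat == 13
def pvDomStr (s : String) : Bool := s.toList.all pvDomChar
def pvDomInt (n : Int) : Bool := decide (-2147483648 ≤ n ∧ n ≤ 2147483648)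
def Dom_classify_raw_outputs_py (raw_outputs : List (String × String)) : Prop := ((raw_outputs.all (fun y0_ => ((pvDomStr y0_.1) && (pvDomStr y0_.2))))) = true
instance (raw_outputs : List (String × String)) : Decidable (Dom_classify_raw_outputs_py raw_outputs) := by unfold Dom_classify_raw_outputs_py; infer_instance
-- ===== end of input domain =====

-- B replaces A's five-bucket single pass with four sequential keyword loops by a
-- tagging pass over a (category, keywords) table plus per-category filter-and-join
-- (objective: simpler).

-- ===== PORT A =====
-- the four keyword sets of A (Python set iteration order does not matter: only
-- whether SOME keyword matches is used; ported as lists in literal order)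
def pvReconTools : List String :=
  ["subfinder", "amass", "whois", "fierce", "dnsenum", "dnsrecon",
   "theharvester", "shodan", "censys", "crtsh", "ct", "osint",
   "hexstrike_recon", "recon"]
def pvNetworkTools : List String :=
  ["nmap", "masscan", "rustscan", "ping", "traceroute",
   "hexstrike_network", "network"]
def pvVulnTools : List String :=
  ["nuclei", "sqlmap", "wpscan_vuln", "hexstrike_vuln", "vuln",
   "vulnerability", "cve"]
def pvWebTools : List String :=
  ["nikto", "gobuster", "dirb", "whatweb", "wafw00f", "httpx",
   "katana", "wpscan", "dirsearch", "ffuf",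
   "hexstrike_web", "web"]

-- A's inner 'for keyword in tools: if keyword in tool_lower: … break' loop,
-- reduced to the flag it sets
def pvLoopMatch : List String → String → Bool
  | [], _ => false
  | k :: rest, tl => if PySem.Str.isIn k tl then true else pvLoopMatch rest tl

-- A's loop body over the state (recon, network, vuln, web, all)
def pvStepA (st : List String × List String × List String × List String × List String)
    (p : String × String) :
    List String × List String × List String × List String × List String :=
  let (r, n, v, w, a) := st
  let toolLower := PySem.Str.lower p.1
  let entry := "=== " ++ p.1 ++ " ===\n" ++ p.2
  let a := a ++ [entry]
  if pvLoopMatch pvReconTools toolLower then (r ++ [entry], n, v, w, a)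
  else if pvLoopMatch pvNetworkTools toolLower then (r, n ++ [entry], v, w, a)
  else if pvLoopMatch pvVulnTools toolLower then (r, n, v ++ [entry], w, a)
  else if pvLoopMatch pvWebTools toolLower then (r, n, v, w ++ [entry], a)
  else (r ++ [entry], n, v, w ++ [entry], a)

def classify_raw_outputs_py (raw_outputs : List (String × String)) : List (String × String) :=
  let fin := raw_outputs.foldl pvStepA ([], [], [], [], [])
  [("recon", PySem.Str.join "\n\n" fin.1),
   ("network", PySem.Str.join "\n\n" fin.2.1),
   ("vuln", PySem.Str.join "\n\n" fin.2.2.1),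
   ("web", PySem.Str.join "\n\n" fin.2.2.2.1),
   ("all", PySem.Str.join "\n\n" fin.2.2.2.2)]

-- ===== PORT B =====
-- the data table of Source B (keyword sets ported as lists; as above only
-- existence of a match is used)
def pvCats : List (String × List String) :=
  [("recon", pvReconTools), ("network", pvNetworkTools),
   ("vuln", pvVulnTools), ("web", pvWebTools)]

-- the 'for cat, keywords in _CATS: if any(...): return (cat,)' loop of Source B's _targets
def pvFindCat : List (String × List String) → String → Option String
  | [], _ => none
  | c :: rest, tl =>
    if c.2.any (fun kw => PySem.Str.isIn kw tl) then some c.1 else pvFindCat rest tl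

-- Source B's _targets: first matching category of the table, or the recon+web fallback
def pvTargets (tool_name : String) : List String :=
  let toolLower := PySem.Str.lower tool_name
  match pvFindCat pvCats toolLower with
  | some c => [c]
  | none => ["recon", "web"]

def classify_raw_outputs_py_alt (raw_outputs : List (String × String)) : List (String × String) :=
  let tagged := raw_outputs.map (fun p => (pvTargets p.1, "=== " ++ p.1 ++ " ===\n" ++ p.2))
  (pvCats.map (fun c =>
    (c.1, PySem.Str.join "\n\n" ((tagged.filter (fun t => t.1.contains c.1)).map (·.2)))))
  ++ [("all", PySem.Str.join "\n\n" (tagged.map (·.2)))]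

-- ===== PRECONDITION & SPEC =====
def Spec_classify_raw_outputs_py (raw_outputs : List (String × String)) (out : List (String × String)) : Prop := out = classify_raw_outputs_py_alt raw_outputs
instance (raw_outputs : List (String × String)) (out : List (String × String)) : Decidable (Spec_classify_raw_outputs_py raw_outputs out) := by unfold Spec_classify_raw_outputs_py; infer_instance

-- ===== CLAIM (what is proved, stated in full; the proofs are below) =====
def Claim_equal_classify_raw_outputs_py : Prop := ∀ (raw_outputs : List (String × String)), Dom_classify_raw_outputs_py raw_outputs → Spec_classify_raw_outputs_py raw_outputs (classify_raw_outputs_py raw_outputs)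

-- ===== LEMMAS AND PROOFS =====

-- the per-category contribution of the tagged list, as B computes it
def pvSel (cat : String) (l : List (String × String)) : List String :=
  ((l.map (fun p => (pvTargets p.1, "=== " ++ p.1 ++ " ===\n" ++ p.2))).filter
    (fun t => t.1.contains cat)).map (·.2)

def pvEntry (p : String × String) : String := "=== " ++ p.1 ++ " ===\n" ++ p.2

def pvSelOne (cat : String) (p : String × String) : List String :=
  if cat ∈ pvTargets p.1 then [pvEntry p] else []

theorem pvLoopMatch_eq_any (kws : List String) (tl : String) :
    pvLoopMatch kws tl = kws.any (fun kw => PySem.Str.isIn kw tl) := by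
  induction kws with
  | nil => rfl
  | cons k rest ih => simp [pvLoopMatch, ih]

theorem pvSel_cons (cat : String) (p : String × String) (rest : List (String × String)) :
    pvSel cat (p :: rest) = pvSelOne cat p ++ pvSel cat rest := by
  simp only [pvSel, pvSelOne, List.map_cons, List.filter_cons, pvEntry]
  by_cases h : cat ∈ pvTargets p.1 <;> simp [h]

theorem pvTargets_eq (s : String) :
    pvTargets s =
      (if pvReconTools.any (fun kw => PySem.Str.isIn kw (PySem.Str.lower s)) then ["recon"]
       else if pvNetworkTools.any (fun kw => PySem.Str.isIn kw (PySem.Str.lower s)) then ["network"]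
       else if pvVulnTools.any (fun kw => PySem.Str.isIn kw (PySem.Str.lower s)) then ["vuln"]
       else if pvWebTools.any (fun kw => PySem.Str.isIn kw (PySem.Str.lower s)) then ["web"]
       else ["recon", "web"]) := by
  simp only [pvTargets, pvCats, pvFindCat]
  cases h1 : pvReconTools.any (fun kw => PySem.Str.isIn kw (PySem.Str.lower s)) <;>
  cases h2 : pvNetworkTools.any (fun kw => PySem.Str.isIn kw (PySem.Str.lower s)) <;>
  cases h3 : pvVulnTools.any (fun kw => PySem.Str.isIn kw (PySem.Str.lower s)) <;>
  cases h4 : pvWebTools.any (fun kw => PySem.Str.isIn kw (PySem.Str.lower s)) <;> rfl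

theorem pvStepA_eq (st : List String × List String × List String × List String × List String)
    (p : String × String) :
    pvStepA st p =
      (st.1 ++ pvSelOne "recon" p, st.2.1 ++ pvSelOne "network" p,
       st.2.2.1 ++ pvSelOne "vuln" p, st.2.2.2.1 ++ pvSelOne "web" p,
       st.2.2.2.2 ++ [pvEntry p]) := by
  obtain ⟨r, n, v, w, a⟩ := st
  simp only [pvStepA, pvSelOne, pvEntry, pvTargets_eq, pvLoopMatch_eq_any]
  cases h1 : pvReconTools.any (fun kw => PySem.Str.isIn kw (PySem.Str.lower p.1)) <;>
  cases h2 : pvNetworkTools.any (fun kw => PySem.Str.isIn kw (PySem.Str.lower p.1)) <;>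
  cases h3 : pvVulnTools.any (fun kw => PySem.Str.isIn kw (PySem.Str.lower p.1)) <;>
  cases h4 : pvWebTools.any (fun kw => PySem.Str.isIn kw (PySem.Str.lower p.1)) <;>
    simp

theorem pvFold_eq (l : List (String × String)) (r n v w a : List String) :
    l.foldl pvStepA (r, n, v, w, a) =
      (r ++ pvSel "recon" l, n ++ pvSel "network" l, v ++ pvSel "vuln" l,
       w ++ pvSel "web" l, a ++ l.map pvEntry) := by
  induction l generalizing r n v w a with
  | nil => simp [pvSel]
  | cons p rest ih =>
    rw [List.foldl_cons, pvStepA_eq, ih]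
    simp [pvSel_cons, List.append_assoc]

-- ===== VERDICT (by name: the statement is the Claim_ definition above) =====
theorem classify_raw_outputs_py_spec : Claim_equal_classify_raw_outputs_py := by
  intro raw_outputs _
  unfold Spec_classify_raw_outputs_py classify_raw_outputs_py classify_raw_outputs_py_alt
  rw [pvFold_eq]
  simp [pvCats, pvSel, Function.comp_def]
  rfl
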